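-- pv_equiv track=rewrite | github.com/appley/advent2024 | 1209.py | to_compact_dict
-- ===== SOURCE A (Python) =====
-- def to_compact_dict(t):
--
--     d = t[0]
--
--     for i in t[1]:
--         if i < len(d):
--             max_d = max(d)
--             d[i] = d[max_d]
--             d.pop(max_d)
--
--     return sorted(d.items())
-- ===== SOURCE B (Python) =====
-- def to_compact_dict(t):
--     # same return value as the original; works on a key-sorted list of items
--     # instead of a dict, so the max key is the last element and no final sort
--     # is needed (the original mutates t[0] in place; this version does not)
--     items = sorted(t[0].items())
--     for i in t[1]:
--         if i < len(items):
--             m, v = items[-1]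
--             items.pop()
--             if i != m:
--                 j = 0
--                 n = len(items)
--                 while j < n and items[j][0] < i:
--                     j += 1
--                 if j < n and items[j][0] == i:
--                     items[j] = (i, v)
--                 else:
--                     items.insert(j, (i, v))
--     return items
-- ===== Notes on version B (the rewrite author's own statement) =====
-- stated objective: alternative
-- what changed: Instead of re-scanning the whole dict with max() every iteration and sorting the items at the end, B sorts once up front and maintains the live entries as a key-sorted list, so the max key is simply the last element and each step pops it and re-places its value by a single ordered insert/replace, with no final sort.
import Mathlib
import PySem

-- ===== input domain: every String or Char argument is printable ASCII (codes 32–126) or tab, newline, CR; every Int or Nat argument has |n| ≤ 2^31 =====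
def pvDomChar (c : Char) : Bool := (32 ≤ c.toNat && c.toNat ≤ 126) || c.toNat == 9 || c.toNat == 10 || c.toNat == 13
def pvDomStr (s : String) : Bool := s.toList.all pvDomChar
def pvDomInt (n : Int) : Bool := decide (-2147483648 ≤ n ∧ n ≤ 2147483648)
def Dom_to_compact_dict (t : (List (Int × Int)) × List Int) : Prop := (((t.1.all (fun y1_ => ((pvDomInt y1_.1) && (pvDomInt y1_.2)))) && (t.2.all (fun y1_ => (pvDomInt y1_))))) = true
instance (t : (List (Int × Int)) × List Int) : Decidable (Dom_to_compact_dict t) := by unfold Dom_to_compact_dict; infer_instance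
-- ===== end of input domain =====

-- B keeps the live entries as a single key-sorted list (the max key is the last element,
-- replaced/inserted in place, no final sort); return-value equivalence only: Python A
-- mutates t[0] in place, B does not.

-- ===== PORT A =====
-- one iteration of A's loop body: if i < len(d): max_d = max(d); d[i] = d[max_d]; d.pop(max_d)
def pvStepA (d : PySem.Dict Int Int) (i : Int) : PySem.Dict Int Int :=
  if i < (d.size : Int) then
    match PySem.List.max? d.keys (fun k => k) with
    | none => d
    | some m => (d.insert i (d.getD m 0)).erase m
  else d

def to_compact_dict (t : (List (Int × Int)) × List Int) : List (Int × Int) :=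
  let d := t.2.foldl pvStepA (PySem.Dict.ofList t.1)
  PySem.List.sorted2 d.items (fun p => p.1) (fun p => p.2) false

-- ===== PORT B =====
-- Source B's inner scan-then-replace-or-insert, as structural recursion over the sorted list
def pvPlace (l : List (Int × Int)) (i v : Int) : List (Int × Int) :=
  match l with
  | [] => [(i, v)]
  | (k, w) :: rest =>
    if k < i then (k, w) :: pvPlace rest i v
    else if k = i then (i, v) :: rest
    else (i, v) :: (k, w) :: rest

-- one iteration of Source B's loop: m, v = items[-1]; items.pop(); if i != m: place (i, v)
def pvStepB (l : List (Int × Int)) (i : Int) : List (Int × Int) :=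
  if i < (l.length : Int) then
    match PySem.List.pyGet? l (-1) with
    | none => l
    | some (m, v) => if i ≠ m then pvPlace l.dropLast i v else l.dropLast
  else l

def to_compact_dict_alt (t : (List (Int × Int)) × List Int) : List (Int × Int) :=
  t.2.foldl pvStepB
    (PySem.List.sorted2 (PySem.Dict.ofList t.1).items (fun p => p.1) (fun p => p.2) false)

-- ===== PRECONDITION & SPEC =====
-- Pre_ excludes EXACTLY the inputs on which Python A raises (ValueError: max() of an empty
-- dict, reached iff some loop step meets a negative index while the dict has become empty;
-- Python B raises IndexError on exactly the same inputs): pvLive follows the loop's key SET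
-- only — the key set after a step with i < |S| is (S ∪ {i}) \ {max S} — and no value, output
-- or port code, and returns false precisely at A's raise point.
def pvLiveStep? (ks : List Int) (i : Int) : Option (List Int) :=
  if i < (ks.length : Int) then
    match ks.max? with
    | none => none
    | some m => some ((i :: ks.filter (fun k => k ≠ i)).filter (fun k => k ≠ m))
  else some ks

def pvLive : List Int → List Int → Bool
  | _, [] => true
  | ks, i :: rest =>
    match pvLiveStep? ks i with
    | none => false
    | some ks' => pvLive ks' rest

def Pre_to_compact_dict (t : (List (Int × Int)) × List Int) : Prop :=
  pvLive (PySem.List.dedup (t.1.map Prod.fst)) t.2 = true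
instance (t : (List (Int × Int)) × List Int) : Decidable (Pre_to_compact_dict t) := by
  unfold Pre_to_compact_dict; infer_instance

def pvWitness_to_compact_dict : ((List (Int × Int)) × List Int) := ([(3, 1), (0, 2)], [0, -1])

def Spec_to_compact_dict (t : (List (Int × Int)) × List Int) (out : List (Int × Int)) : Prop := out = to_compact_dict_alt t
instance (t : (List (Int × Int)) × List Int) (out : List (Int × Int)) : Decidable (Spec_to_compact_dict t out) := by unfold Spec_to_compact_dict; infer_instance

-- ===== CLAIM (what is proved, stated in full; the proofs are below) =====
def Claim_equal_to_compact_dict : Prop := ∀ (t : (List (Int × Int)) × List Int), Dom_to_compact_dict t → Pre_to_compact_dict t → Spec_to_compact_dict t (to_compact_dict t)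

-- ===== LEMMAS AND PROOFS =====
def pvInv (d : PySem.Dict Int Int) (l : List (Int × Int)) : Prop :=
  d.keys.Nodup ∧ l.Perm d.items ∧ l.Pairwise (fun a b => a.1 < b.1)

theorem pvInsertBy_congr {α : Type} (f g : α → α → Bool) (x : α) (acc : List α)
    (h : ∀ b ∈ acc, f x b = g x b) :
    PySem.List.insertBy f x acc = PySem.List.insertBy g x acc := by
  induction acc with
  | nil => rfl
  | cons y ys ih =>
    simp only [PySem.List.insertBy]
    rw [h y (by simp)]
    split
    · rfl
    · rw [ih (fun b hb => h b (by simp [hb]))]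

theorem pvFoldl_insertBy_congr (f g : (Int × Int) → (Int × Int) → Bool)
    (hfg : ∀ a b : Int × Int, a.1 ≠ b.1 → f a b = g a b)
    (xs acc : List (Int × Int))
    (hp : xs.Pairwise (fun a b => a.1 ≠ b.1))
    (hacc : ∀ a ∈ xs, ∀ b ∈ acc, a.1 ≠ b.1) :
    xs.foldl (fun acc x => PySem.List.insertBy f x acc) acc
      = xs.foldl (fun acc x => PySem.List.insertBy g x acc) acc := by
  induction xs generalizing acc with
  | nil => rfl
  | cons x rest ih =>
    simp only [List.foldl_cons]
    rw [pvInsertBy_congr f g x acc (fun b hb => hfg x b (hacc x (by simp) b hb))]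
    exact ih _ (List.Pairwise.of_cons hp) (fun a ha b hb => by
      rcases (PySem.List.mem_insertBy g x b acc).1 hb with h1 | h1
      · subst h1; exact (List.pairwise_cons.1 hp).1 a ha |>.symm
      · exact hacc a (by simp [ha]) b h1)

theorem pvSorted2_eq_sorted (xs : List (Int × Int)) (h : (xs.map Prod.fst).Nodup) :
    PySem.List.sorted2 xs (fun p => p.1) (fun p => p.2) false
      = PySem.List.sorted xs (fun p => p.1) false := by
  have hp : xs.Pairwise (fun a b : Int × Int => a.1 ≠ b.1) := by
    rw [List.Nodup, List.pairwise_map] at h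
    exact h
  simp only [PySem.List.sorted2, PySem.List.sorted]
  apply pvFoldl_insertBy_congr _ _ _ xs [] hp (by simp)
  intro a b hne
  by_cases hab : a.1 < b.1
  · simp [hab]
  · have : b.1 < a.1 := by omega
    simp [hab, this]

theorem pvSorted2_eq_of_inv (d : PySem.Dict Int Int) (l : List (Int × Int)) (h : pvInv d l) :
    PySem.List.sorted2 d.items (fun p => p.1) (fun p => p.2) false = l := by
  obtain ⟨hnd, hperm, hpl⟩ := h
  rw [pvSorted2_eq_sorted _ hnd]
  exact PySem.List.sorted_eq_of_perm_of_pairwise_lt _ _ _ hperm hpl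

theorem pvPlace_mem (l : List (Int × Int)) (i v : Int) (y : Int × Int)
    (h : y ∈ pvPlace l i v) : y = (i, v) ∨ y ∈ l := by
  induction l with
  | nil => simp [pvPlace] at h; simp [h]
  | cons p rest ih =>
    obtain ⟨k, w⟩ := p
    simp only [pvPlace] at h
    by_cases hk : k < i
    · rw [if_pos hk] at h
      rcases List.mem_cons.1 h with h | h
      · right; simp [h]
      · rcases ih h with h1 | h1
        · left; exact h1
        · right; simp [h1]
    · rw [if_neg hk] at h
      by_cases hki : k = i
      · rw [if_pos hki] at h
        rcases List.mem_cons.1 h with h | h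
        · left; exact h
        · right; simp [h]
      · rw [if_neg hki] at h
        rcases List.mem_cons.1 h with h | h
        · left; exact h
        · right; exact h

theorem pvPlace_pairwise (l : List (Int × Int)) (i v : Int)
    (h : l.Pairwise (fun a b => a.1 < b.1)) :
    (pvPlace l i v).Pairwise (fun a b => a.1 < b.1) := by
  induction l with
  | nil => simp [pvPlace]
  | cons p rest ih =>
    obtain ⟨k, w⟩ := p
    obtain ⟨h1, h2⟩ := List.pairwise_cons.1 h
    simp only [pvPlace]
    by_cases hk : k < i
    · rw [if_pos hk]
      refine List.pairwise_cons.2 ⟨?_, ih h2⟩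
      intro y hy
      rcases pvPlace_mem rest i v y hy with rfl | hmem
      · exact hk
      · exact h1 y hmem
    · rw [if_neg hk]
      by_cases hki : k = i
      · rw [if_pos hki]
        subst hki
        exact List.pairwise_cons.2 ⟨h1, h2⟩
      · rw [if_neg hki]
        refine List.pairwise_cons.2 ⟨?_, List.pairwise_cons.2 ⟨h1, h2⟩⟩
        intro y hy
        rcases List.mem_cons.1 hy with rfl | hy
        · simp; omega
        · have := h1 y hy; simp at this ⊢; omega

theorem pvPlace_perm (l : List (Int × Int)) (i v : Int)
    (h : l.Pairwise (fun a b => a.1 < b.1)) :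
    (pvPlace l i v).Perm ((i, v) :: l.filter (fun p => !(p.1 == i))) := by
  induction l with
  | nil => simp [pvPlace]
  | cons p rest ih =>
    obtain ⟨k, w⟩ := p
    obtain ⟨h1, h2⟩ := List.pairwise_cons.1 h
    simp only [pvPlace]
    by_cases hk : k < i
    · rw [if_pos hk, List.filter_cons, if_pos (show (!((k, w).1 == i)) = true by simp; omega)]
      exact ((ih h2).cons _).trans (List.Perm.swap _ _ _)
    · rw [if_neg hk]
      by_cases hki : k = i
      · rw [if_pos hki]
        subst hki
        have hrest : rest.filter (fun p => !(p.1 == k)) = rest := by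
          apply List.filter_eq_self.2
          intro p hp
          have := h1 p hp
          simp; omega
        rw [List.filter_cons, if_neg (by simp), hrest]
      · rw [if_neg hki]
        have : ((k, w) :: rest).filter (fun p => !(p.1 == i)) = (k, w) :: rest := by
          apply List.filter_eq_self.2
          intro p hp
          rcases List.mem_cons.1 hp with rfl | hp
          · simp; omega
          · have := h1 p hp; simp at this ⊢; omega
        rw [this]

theorem pvMapReplace_perm (zs : List (Int × Int)) (i w : Int)
    (hnd : (zs.map Prod.fst).Nodup) (hi : i ∈ zs.map Prod.fst) :
    (zs.map (fun p => if p.1 == i then (i, w) else p)).Perm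
      ((i, w) :: zs.filter (fun p => !(p.1 == i))) := by
  induction zs with
  | nil => simp at hi
  | cons a rest ih =>
    rw [List.map_cons, List.nodup_cons] at hnd
    by_cases ha : a.1 = i
    · have hrest : ∀ p ∈ rest, p.1 ≠ i := by
        intro p hp hpe
        exact hnd.1 (ha ▸ hpe ▸ List.mem_map_of_mem hp)
      have hmap : rest.map (fun p => if p.1 == i then (i, w) else p) = rest := by
        conv_rhs => rw [← List.map_id rest]
        apply List.map_congr_left
        intro p hp
        simp [hrest p hp]
      rw [List.map_cons, if_pos (by simp [ha]), hmap, List.filter_cons,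
        if_neg (by simp [ha]),
        List.filter_eq_self.2 (fun p hp => by simp [hrest p hp])]
    · have hi' : i ∈ rest.map Prod.fst := by
        rcases List.mem_map.1 hi with ⟨p, hp, hpe⟩
        rcases List.mem_cons.1 hp with rfl | hp
        · exact absurd hpe ha
        · exact hpe ▸ List.mem_map_of_mem hp
      rw [List.map_cons, if_neg (by simp [ha]), List.filter_cons,
        if_pos (by simp [ha])]
      exact ((ih hnd.2 hi').cons a).trans (List.Perm.swap _ _ _)

theorem pvInsertErase_items (d : PySem.Dict Int Int) (i m w : Int)
    (hnd : d.keys.Nodup) (him : i ≠ m) :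
    ((d.insert i w).erase m).items.Perm
      ((i, w) :: d.items.filter (fun p => !(p.1 == i) && !(p.1 == m))) := by
  by_cases hc : d.contains i
  · have h1 : (d.insert i w).items
        = d.items.map (fun p => if p.1 == i then (i, w) else p) :=
      PySem.Dict.items_insert_of_contains d w hc
    show (((d.insert i w).items).filter (fun p => !(p.1 == m))).Perm _
    rw [h1, List.filter_map]
    have hcomp : d.items.filter
          ((fun p : Int × Int => !(p.1 == m)) ∘ (fun p => if p.1 == i then (i, w) else p))
        = d.items.filter (fun p => !(p.1 == m)) := by
      apply List.filter_congr
      intro p _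
      by_cases hpi : p.1 = i
      · simp [hpi]
      · simp [hpi]
    rw [hcomp]
    have hndf : ((d.items.filter (fun p => !(p.1 == m))).map Prod.fst).Nodup := by
      exact (List.filter_sublist.map Prod.fst).nodup hnd
    have hif : i ∈ (d.items.filter (fun p => !(p.1 == m))).map Prod.fst := by
      have hk : i ∈ d.keys := (PySem.Dict.contains_iff_mem_keys d i).1 hc
      simp only [PySem.Dict.keys] at hk
      rcases List.mem_map.1 hk with ⟨p, hp, hpe⟩
      have hpf : p ∈ d.items.filter (fun p => !(p.1 == m)) :=
        List.mem_filter.2 ⟨hp, by simp [hpe, him]⟩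
      rw [← hpe]
      exact List.mem_map_of_mem hpf
    refine (pvMapReplace_perm _ i w hndf hif).trans ?_
    rw [List.filter_filter]
  · have h1 : (d.insert i w).items = d.items ++ [(i, w)] :=
      PySem.Dict.items_insert_of_not_contains d w (by simpa using hc)
    show (((d.insert i w).items).filter (fun p => !(p.1 == m))).Perm _
    rw [h1, List.filter_append]
    have h2 : ([(i, w)] : List (Int × Int)).filter (fun p => !(p.1 == m)) = [(i, w)] := by
      simp [him]
    have hni : ∀ p ∈ d.items, p.1 ≠ i := by
      intro p hp hpe
      apply (by simpa using hc : ¬ d.contains i = true)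
      simp only [PySem.Dict.contains, List.any_eq_true]
      exact ⟨p, hp, by simp [hpe]⟩
    have h3 : d.items.filter (fun p => !(p.1 == m))
        = d.items.filter (fun p => !(p.1 == i) && !(p.1 == m)) := by
      apply List.filter_congr
      intro p hp
      simp [hni p hp]
    rw [h2, h3]
    exact List.perm_append_singleton _ _

theorem pvInsertEraseSelf_items (d : PySem.Dict Int Int) (m w : Int) :
    ((d.insert m w).erase m).items = d.items.filter (fun p => !(p.1 == m)) := by
  by_cases hc : d.contains m
  · show ((d.insert m w).items).filter (fun p => !(p.1 == m)) = _
    rw [PySem.Dict.items_insert_of_contains d w hc, List.filter_map]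
    have hcomp : d.items.filter
          ((fun p : Int × Int => !(p.1 == m)) ∘ (fun p => if p.1 == m then (m, w) else p))
        = d.items.filter (fun p => !(p.1 == m)) := by
      apply List.filter_congr
      intro p _
      by_cases hpm : p.1 = m <;> simp [hpm]
    rw [hcomp]
    conv_rhs => rw [← List.map_id (d.items.filter (fun p => !(p.1 == m)))]
    apply List.map_congr_left
    intro p hp
    have := (List.mem_filter.1 hp).2
    simp at this
    simp [this]
  · show ((d.insert m w).items).filter (fun p => !(p.1 == m)) = _
    rw [PySem.Dict.items_insert_of_not_contains d w (by simpa using hc), List.filter_append]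
    simp

theorem pvEraseKeys_nodup (d : PySem.Dict Int Int) (m : Int) (h : d.keys.Nodup) :
    (d.erase m).keys.Nodup :=
  (List.filter_sublist.map Prod.fst).nodup h

theorem pvStep_inv (d : PySem.Dict Int Int) (l : List (Int × Int)) (i : Int)
    (h : pvInv d l) : pvInv (pvStepA d i) (pvStepB l i) := by
  obtain ⟨hnd, hperm, hpl⟩ := h
  have hlen : l.length = d.items.length := hperm.length_eq
  unfold pvStepA pvStepB
  have hsz : (d.size : Int) = (l.length : Int) := by
    simp [PySem.Dict.size, hlen]
  by_cases hg : i < (l.length : Int)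
  · rw [if_pos (by rw [hsz]; exact hg), if_pos hg]
    by_cases hnil : l = []
    · subst hnil
      have hitems : d.items = [] := hperm.symm.eq_nil
      have hkeys : d.keys = [] := by simp [PySem.Dict.keys, hitems]
      rw [(PySem.List.max?_eq_none_iff _ _).2 hkeys]
      simp only [PySem.List.pyGet?_neg_one, List.getLast?_nil]
      exact ⟨hnd, hperm, hpl⟩
    · obtain ⟨mB, v, hglast⟩ : ∃ mB v, l.getLast hnil = (mB, v) := by
        rcases hq : l.getLast hnil with ⟨a, b⟩
        exact ⟨a, b, rfl⟩
      have hlast : l.getLast? = some (mB, v) := by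
        rw [List.getLast?_eq_some_getLast hnil, hglast]
      have hldef : l.dropLast ++ [(mB, v)] = l := by
        rw [← hglast]; exact List.dropLast_append_getLast hnil
      have hmem : (mB, v) ∈ l := hglast ▸ List.getLast_mem hnil
      obtain ⟨m, hm⟩ : ∃ m, PySem.List.max? d.keys (fun k => k) = some m := by
        cases hmx : PySem.List.max? d.keys (fun k => k) with
        | none =>
          have hkeys := (PySem.List.max?_eq_none_iff _ _).1 hmx
          have hitems : d.items = [] := by
            have h2 : d.items.map Prod.fst = [] := hkeys
            simpa using h2
          exact absurd (List.Perm.eq_nil (hitems ▸ hperm)) hnil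
        | some m => exact ⟨m, rfl⟩
      rw [hm]
      simp only [PySem.List.pyGet?_neg_one, hlast]
      have hpapp : (l.dropLast ++ [(mB, v)]).Pairwise (fun a b => a.1 < b.1) := by
        rw [hldef]; exact hpl
      have hpl2 := List.pairwise_append.1 hpapp
      have hpl' : (l.dropLast).Pairwise (fun a b => a.1 < b.1) := hpl2.1
      have hplm : ∀ p ∈ l.dropLast, p.1 < mB := fun p hp => by
        simpa using hpl2.2.2 p hp (mB, v) (by simp)
      have hmax := PySem.List.max?_isMax hm
      have hmmem := PySem.List.max?_mem hm
      have hmBkeys : mB ∈ d.keys := by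
        simp only [PySem.Dict.keys]
        exact List.mem_map_of_mem (hperm.subset hmem)
      have hmeq : m = mB := by
        simp only [PySem.Dict.keys] at hmmem
        rcases List.mem_map.1 hmmem with ⟨q, hq, hqe⟩
        have hql : q ∈ l := hperm.mem_iff.2 hq
        rw [← hldef] at hql
        rcases List.mem_append.1 hql with hq1 | hq1
        · have h1 := hplm q hq1
          have h2 := hmax _ hmBkeys
          simp at h2
          omega
        · simp at hq1
          rw [← hqe, hq1]
      subst hmeq
      have hv : d.getD m 0 = v := PySem.Dict.getD_of_mem_items d (hperm.subset hmem) hnd 0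
      have hdlfilter : l.filter (fun p => !(p.1 == m)) = l.dropLast := by
        conv_lhs => rw [← hldef]
        rw [List.filter_append]
        have h1 : (l.dropLast).filter (fun p => !(p.1 == m)) = l.dropLast :=
          List.filter_eq_self.2 (fun p hp => by have := hplm p hp; simp; omega)
        simp [h1]
      by_cases hi : i ≠ m
      · rw [if_pos hi]
        refine ⟨pvEraseKeys_nodup _ _ (PySem.Dict.nodup_keys_insert _ _ _ hnd), ?_,
          pvPlace_pairwise _ _ _ hpl'⟩
        rw [hv]
        refine ((pvPlace_perm _ i v hpl').trans ?_).trans (pvInsertErase_items d i m v hnd hi).symm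
        apply List.Perm.cons
        rw [← hdlfilter, List.filter_filter]
        exact hperm.filter _
      · rw [if_neg hi]
        have hieq : i = m := not_ne_iff.1 hi
        subst hieq
        refine ⟨pvEraseKeys_nodup _ _ (PySem.Dict.nodup_keys_insert _ _ _ hnd), ?_, hpl'⟩
        rw [pvInsertEraseSelf_items, ← hdlfilter]
        exact hperm.filter _
  · rw [if_neg (by rw [hsz]; exact hg), if_neg hg]
    exact ⟨hnd, hperm, hpl⟩

theorem pvFold_inv (xs : List Int) (d : PySem.Dict Int Int) (l : List (Int × Int))
    (h : pvInv d l) : pvInv (xs.foldl pvStepA d) (xs.foldl pvStepB l) := by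
  induction xs generalizing d l with
  | nil => exact h
  | cons x rest ih => exact ih _ _ (pvStep_inv d l x h)

theorem pvInit_inv (ps : List (Int × Int)) :
    pvInv (PySem.Dict.ofList ps)
      (PySem.List.sorted2 (PySem.Dict.ofList ps).items (fun p => p.1) (fun p => p.2) false) := by
  have hnd : (PySem.Dict.ofList ps).keys.Nodup := PySem.Dict.nodup_keys_ofList ps
  have hperm := @PySem.List.sorted2_perm (Int × Int) Int Int _ _ _ _
    (PySem.Dict.ofList ps).items (fun p => p.1) (fun p => p.2) false
  refine ⟨hnd, hperm, ?_⟩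
  rw [pvSorted2_eq_sorted _ hnd]
  have hle := PySem.List.sorted_pairwise (PySem.Dict.ofList ps).items (fun p : Int × Int => p.1)
  have hndl : ((PySem.List.sorted (PySem.Dict.ofList ps).items (fun p : Int × Int => p.1) false).map Prod.fst).Nodup := by
    exact (((PySem.List.sorted_perm (PySem.Dict.ofList ps).items
      (fun p : Int × Int => p.1) false).map Prod.fst).nodup_iff).2 hnd
  have hne : (PySem.List.sorted (PySem.Dict.ofList ps).items (fun p : Int × Int => p.1) false).Pairwise
      (fun a b : Int × Int => a.1 ≠ b.1) := by
    rw [List.Nodup, List.pairwise_map] at hndl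
    exact hndl
  exact (hle.and hne).imp (fun h => lt_of_le_of_ne h.1 h.2)

-- ===== VERDICT (by name: the statement is the Claim_ definition above) =====
theorem to_compact_dict_spec : Claim_equal_to_compact_dict := by
  intro t _ _
  unfold Spec_to_compact_dict to_compact_dict to_compact_dict_alt
  exact pvSorted2_eq_of_inv _ _ (pvFold_inv t.2 _ _ (pvInit_inv t.1))
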